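-- pv_equiv track=rewrite | github.com/dstanziola/inventarioVentasApp | src/infrastructure/exports/report_templates.py | _summarize_movements_data
-- ===== SOURCE A (Python) =====
-- from typing import Dict, Any, List, Optional, Union, Tuple
--
-- def _summarize_movements_data(data: List[Dict[str, Any]]) -> Dict[str, Any]:
--     """Crear resumen específico para datos de movimientos."""
--     summary = {
--         'total_movimientos': len(data),
--         'total_entradas': 0,
--         'total_ajustes': 0,
--         'productos_afectados': set(),
--         'responsables': set()
--     }
--
--     for record in data:
--         # Contar por tipo
--         tipo = record.get('Tipo', record.get('tipo_movimiento', ''))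
--         if tipo == 'ENTRADA':
--             summary['total_entradas'] += 1
--         elif tipo == 'AJUSTE':
--             summary['total_ajustes'] += 1
--
--         # Productos únicos
--         producto = record.get('Producto', record.get('producto_nombre', ''))
--         if producto:
--             summary['productos_afectados'].add(producto)
--
--         # Responsables únicos
--         responsable = record.get('Responsable', record.get('responsable', ''))
--         if responsable:
--             summary['responsables'].add(responsable)
--
--     # Convertir sets a conteos
--     summary['total_productos_afectados'] = len(summary['productos_afectados'])
--     summary['total_responsables'] = len(summary['responsables'])
--
--     # Limpiar sets (no serializables)
--     del summary['productos_afectados']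
--     del summary['responsables']
--
--     return summary
-- ===== SOURCE B (Python) =====
-- def _summarize_movements_data(data):
--     """Resumen de movimientos via aggregations independientes (una por clave)."""
--     def get(record, k1, k2):
--         return record.get(k1, record.get(k2, ''))
--     return {
--         'total_movimientos': len(data),
--         'total_entradas': sum(1 for r in data if get(r, 'Tipo', 'tipo_movimiento') == 'ENTRADA'),
--         'total_ajustes': sum(1 for r in data if get(r, 'Tipo', 'tipo_movimiento') == 'AJUSTE'),
--         'total_productos_afectados': len({v for r in data if (v := get(r, 'Producto', 'producto_nombre'))}),
--         'total_responsables': len({v for r in data if (v := get(r, 'Responsable', 'responsable'))}),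
--     }
-- ===== Notes on version B (the rewrite author's own statement) =====
-- stated objective: simpler
-- what changed: Replaces the single loop that threads four accumulators (two counters plus two mutable sets later converted and deleted) with five independent one-line aggregations (two filtered counts, two set-comprehension cardinalities) building the result dict directly with only the output keys.
import Mathlib
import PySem

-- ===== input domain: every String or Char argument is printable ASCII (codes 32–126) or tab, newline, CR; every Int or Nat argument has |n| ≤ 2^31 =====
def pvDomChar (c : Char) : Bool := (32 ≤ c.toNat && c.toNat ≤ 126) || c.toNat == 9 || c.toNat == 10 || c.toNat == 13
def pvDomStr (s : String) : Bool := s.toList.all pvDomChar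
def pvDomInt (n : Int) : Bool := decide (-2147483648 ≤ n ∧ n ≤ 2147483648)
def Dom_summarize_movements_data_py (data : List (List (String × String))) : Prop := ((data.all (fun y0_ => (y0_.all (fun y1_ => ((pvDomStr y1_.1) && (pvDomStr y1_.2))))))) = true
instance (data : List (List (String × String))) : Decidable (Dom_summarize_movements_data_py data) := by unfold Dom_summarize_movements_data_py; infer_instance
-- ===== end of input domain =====

-- B replaces A's single four-accumulator loop by five independent one-line aggregations; objective: simpler.

-- ===== PORT A =====
-- record.get(k1, record.get(k2, '')) — first-match association-list lookup, exact Python dict semantics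
def pvRecGet (r : List (String × String)) (k1 k2 : String) : String :=
  (PySem.Dict.mk r).getD k1 ((PySem.Dict.mk r).getD k2 "")

def summarize_movements_data_py (data : List (List (String × String))) : List (String × Int) :=
  let s := data.foldl
    (fun (acc : Int × Int × PySem.Set String × PySem.Set String) record =>
      let tipo := pvRecGet record "Tipo" "tipo_movimiento"
      let acc := if tipo == "ENTRADA" then (acc.1 + 1, acc.2.1, acc.2.2.1, acc.2.2.2)
                 else if tipo == "AJUSTE" then (acc.1, acc.2.1 + 1, acc.2.2.1, acc.2.2.2)
                 else acc
      let producto := pvRecGet record "Producto" "producto_nombre"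
      let acc := if producto != "" then (acc.1, acc.2.1, PySem.Set.add acc.2.2.1 producto, acc.2.2.2)
                 else acc
      let responsable := pvRecGet record "Responsable" "responsable"
      if responsable != "" then (acc.1, acc.2.1, acc.2.2.1, PySem.Set.add acc.2.2.2 responsable)
      else acc)
    ((0 : Int), (0 : Int), (PySem.Set.empty : PySem.Set String), (PySem.Set.empty : PySem.Set String))
  [("total_movimientos", (data.length : Int)),
   ("total_entradas", s.1),
   ("total_ajustes", s.2.1),
   ("total_productos_afectados", (PySem.Set.len s.2.2.1 : Int)),
   ("total_responsables", (PySem.Set.len s.2.2.2 : Int))]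

-- ===== PORT B =====
def summarize_movements_data_py_alt (data : List (List (String × String))) : List (String × Int) :=
  [("total_movimientos", (data.length : Int)),
   ("total_entradas", ((data.countP (fun r => pvRecGet r "Tipo" "tipo_movimiento" == "ENTRADA")) : Int)),
   ("total_ajustes", ((data.countP (fun r => pvRecGet r "Tipo" "tipo_movimiento" == "AJUSTE")) : Int)),
   ("total_productos_afectados",
     ((PySem.Set.len (PySem.Set.ofList
       (((data.map (fun r => pvRecGet r "Producto" "producto_nombre")).filter (fun v => v != ""))))) : Int)),
   ("total_responsables",
     ((PySem.Set.len (PySem.Set.ofList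
       (((data.map (fun r => pvRecGet r "Responsable" "responsable")).filter (fun v => v != ""))))) : Int))]

-- ===== PRECONDITION & SPEC =====
def Spec_summarize_movements_data_py (data : List (List (String × String))) (out : List (String × Int)) : Prop := out = summarize_movements_data_py_alt data
instance (data : List (List (String × String))) (out : List (String × Int)) : Decidable (Spec_summarize_movements_data_py data out) := by unfold Spec_summarize_movements_data_py; infer_instance

-- ===== CLAIM (what is proved, stated in full; the proofs are below) =====
def Claim_equal_summarize_movements_data_py : Prop := ∀ (data : List (List (String × String))), Dom_summarize_movements_data_py data → Spec_summarize_movements_data_py data (summarize_movements_data_py data)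

-- ===== LEMMAS AND PROOFS =====

-- A's loop, from an arbitrary accumulator, in terms of B's independent aggregations
theorem pv_fold_characterization (data : List (List (String × String)))
    (e a : Int) (ps rs : PySem.Set String) :
    data.foldl
      (fun (acc : Int × Int × PySem.Set String × PySem.Set String) record =>
        let tipo := pvRecGet record "Tipo" "tipo_movimiento"
        let acc := if tipo == "ENTRADA" then (acc.1 + 1, acc.2.1, acc.2.2.1, acc.2.2.2)
                   else if tipo == "AJUSTE" then (acc.1, acc.2.1 + 1, acc.2.2.1, acc.2.2.2)
                   else acc
        let producto := pvRecGet record "Producto" "producto_nombre"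
        let acc := if producto != "" then (acc.1, acc.2.1, PySem.Set.add acc.2.2.1 producto, acc.2.2.2)
                   else acc
        let responsable := pvRecGet record "Responsable" "responsable"
        if responsable != "" then (acc.1, acc.2.1, acc.2.2.1, PySem.Set.add acc.2.2.2 responsable)
        else acc)
      (e, a, ps, rs)
    = (e + (data.countP (fun r => pvRecGet r "Tipo" "tipo_movimiento" == "ENTRADA") : Int),
       a + (data.countP (fun r => pvRecGet r "Tipo" "tipo_movimiento" == "AJUSTE") : Int),
       ((data.map (fun r => pvRecGet r "Producto" "producto_nombre")).filter (fun v => v != "")).foldl PySem.Set.add ps,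
       ((data.map (fun r => pvRecGet r "Responsable" "responsable")).filter (fun v => v != "")).foldl PySem.Set.add rs) := by
  induction data generalizing e a ps rs with
  | nil => simp
  | cons x xs ih =>
    simp only [List.foldl_cons, List.countP_cons, List.map_cons, List.filter_cons]
    cases h1 : (pvRecGet x "Tipo" "tipo_movimiento" == "ENTRADA") <;>
    cases h2 : (pvRecGet x "Tipo" "tipo_movimiento" == "AJUSTE") <;>
    cases h3 : (pvRecGet x "Producto" "producto_nombre" != "") <;>
    cases h4 : (pvRecGet x "Responsable" "responsable" != "") <;>
      (try (exfalso; rw [beq_iff_eq] at h1 h2; rw [h1] at h2; exact absurd h2 (by decide))) <;>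
      simp only [h1, h2, h3, h4, Bool.false_eq_true, if_true, if_false, ite_true, ite_false] <;>
      rw [ih] <;>
      simp [Prod.ext_iff] <;> push_cast <;> ring

-- ===== VERDICT (by name: the statement is the Claim_ definition above) =====
theorem summarize_movements_data_py_spec : Claim_equal_summarize_movements_data_py := by
  intro data _
  show summarize_movements_data_py data = summarize_movements_data_py_alt data
  unfold summarize_movements_data_py summarize_movements_data_py_alt
  rw [pv_fold_characterization]
  simp [PySem.Set.ofList_eq_foldl, PySem.Set.empty]
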